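-- pv_equiv track=rewrite | github.com/wuziniu/CE_scheme | Join_scheme/bound.py | get_sub_plan_join_key
-- ===== SOURCE A (Python) =====
-- def get_sub_plan_join_key(sub_plan_query, join_cond):
--     # returning a subset of join_keys covered by the tables in sub_plan_query
--     touched_join_cond = set()
--     untouched_join_cond = set()
--     for tab in join_cond:
--         if tab in sub_plan_query:
--             touched_join_cond = touched_join_cond.union(join_cond[tab])
--         else:
--             untouched_join_cond = untouched_join_cond.union(join_cond[tab])
--     touched_join_cond -= untouched_join_cond
--
--     join_keys = dict()
--     for cond in touched_join_cond:
--         key1 = cond.split("=")[0].strip()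
--         table1 = key1.split(".")[0].strip()
--         if table1 not in join_keys:
--             join_keys[table1] = set([key1])
--         else:
--             join_keys[table1].add(key1)
--
--         key2 = cond.split("=")[1].strip()
--         table2 = key2.split(".")[0].strip()
--         if table2 not in join_keys:
--             join_keys[table2] = set([key2])
--         else:
--             join_keys[table2].add(key2)
--
--     return join_keys
-- ===== SOURCE B (Python) =====
-- def get_sub_plan_join_key(sub_plan_query, join_cond):
--     # inverted index: condition -> set of tables whose entry mentions it
--     cond_tables = {}
--     for tab in join_cond:
--         for cond in join_cond[tab]:
--             cond_tables.setdefault(cond, set()).add(tab)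
--     join_keys = {}
--     for cond, tabs in cond_tables.items():
--         if any(t in sub_plan_query for t in tabs) and all(t in sub_plan_query for t in tabs):
--             for key in (cond.split("=")[0].strip(), cond.split("=")[1].strip()):
--                 join_keys.setdefault(key.split(".")[0].strip(), set()).add(key)
--     return join_keys
-- ===== Notes on version B (the rewrite author's own statement) =====
-- stated objective: alternative
-- what changed: B builds an inverted index condition -> set of mentioning tables in one pass and keeps a condition iff some mentioning table is in sub_plan_query and none is outside it, replacing A's two union-accumulator sets plus set difference; the per-condition parse is a single fold over the two '='-sides instead of two duplicated insert-or-add branches.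
import Mathlib
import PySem

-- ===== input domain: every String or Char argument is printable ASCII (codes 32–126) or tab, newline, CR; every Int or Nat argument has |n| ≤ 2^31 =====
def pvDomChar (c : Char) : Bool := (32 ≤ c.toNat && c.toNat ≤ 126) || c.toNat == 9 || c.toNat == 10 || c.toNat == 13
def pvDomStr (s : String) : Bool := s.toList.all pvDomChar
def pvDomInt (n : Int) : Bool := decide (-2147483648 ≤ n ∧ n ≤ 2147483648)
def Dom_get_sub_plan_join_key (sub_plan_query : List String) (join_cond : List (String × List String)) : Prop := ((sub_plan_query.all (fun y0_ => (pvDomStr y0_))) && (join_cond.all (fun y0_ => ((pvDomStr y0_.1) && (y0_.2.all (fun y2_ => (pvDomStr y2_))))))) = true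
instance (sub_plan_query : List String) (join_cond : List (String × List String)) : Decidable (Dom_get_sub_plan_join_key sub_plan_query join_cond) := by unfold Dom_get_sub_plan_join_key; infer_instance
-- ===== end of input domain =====

-- B replaces A's two union-accumulator sets plus set difference by an inverted index
-- condition -> mentioning tables filtered against sub_plan_query (alternative decomposition, same cost).

-- ===== PORT A =====
-- 'join_cond' is a Python dict: iteration runs over its entries (PySem.Dict.ofList join_cond).items.
def get_sub_plan_join_key (sub_plan_query : List String) (join_cond : List (String × List String)) : List (String × List String) :=
  let entries := (PySem.Dict.ofList join_cond).items
  let tu := entries.foldl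
    (fun (tu : PySem.Set String × PySem.Set String) p =>
      if sub_plan_query.contains p.1 then (PySem.Set.union tu.1 p.2, tu.2)
      else (tu.1, PySem.Set.union tu.2 p.2))
    (PySem.Set.empty, PySem.Set.empty)
  let touched := PySem.Set.diff tu.1 tu.2
  let join_keys := touched.foldl
    (fun (d : PySem.Dict String (PySem.Set String)) cond =>
      let key1 := PySem.Str.strip (PySem.List.pyGetD ((PySem.Str.split? cond "=").getD []) 0 "")
      let table1 := PySem.Str.strip (PySem.List.pyGetD ((PySem.Str.split? key1 ".").getD []) 0 "")
      let d1 := if d.contains table1 = false then d.insert table1 (PySem.Set.ofList [key1])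
                else d.modify table1 PySem.Set.empty (fun s => PySem.Set.add s key1)
      let key2 := PySem.Str.strip (PySem.List.pyGetD ((PySem.Str.split? cond "=").getD []) 1 "")
      let table2 := PySem.Str.strip (PySem.List.pyGetD ((PySem.Str.split? key2 ".").getD []) 0 "")
      if d1.contains table2 = false then d1.insert table2 (PySem.Set.ofList [key2])
      else d1.modify table2 PySem.Set.empty (fun s => PySem.Set.add s key2))
    PySem.Dict.empty
  join_keys.items

-- ===== PORT B =====
def get_sub_plan_join_key_alt (sub_plan_query : List String) (join_cond : List (String × List String)) : List (String × List String) :=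
  let entries := (PySem.Dict.ofList join_cond).items
  let cond_tables := entries.foldl
    (fun (d : PySem.Dict String (PySem.Set String)) p =>
      p.2.foldl (fun d cond => d.modify cond PySem.Set.empty (fun s => PySem.Set.add s p.1)) d)
    PySem.Dict.empty
  let join_keys := cond_tables.items.foldl
    (fun (d : PySem.Dict String (PySem.Set String)) q =>
      if q.2.any (fun t => sub_plan_query.contains t) && q.2.all (fun t => sub_plan_query.contains t) then
        [PySem.Str.strip (PySem.List.pyGetD ((PySem.Str.split? q.1 "=").getD []) 0 ""),
         PySem.Str.strip (PySem.List.pyGetD ((PySem.Str.split? q.1 "=").getD []) 1 "")].foldl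
          (fun d key =>
            d.modify (PySem.Str.strip (PySem.List.pyGetD ((PySem.Str.split? key ".").getD []) 0 ""))
              PySem.Set.empty (fun s => PySem.Set.add s key)) d
      else d)
    PySem.Dict.empty
  join_keys.items

-- ===== PRECONDITION & SPEC =====
-- Pre_ excludes exactly the inputs where Python A raises IndexError: a kept condition
-- (mentioned by an in-plan table and by no out-of-plan table) that contains no "=",
-- so that cond.split("=")[1] is out of range.
def Pre_get_sub_plan_join_key (sub_plan_query : List String) (join_cond : List (String × List String)) : Prop :=
  ∀ p ∈ (PySem.Dict.ofList join_cond).items, p.1 ∈ sub_plan_query →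
    ∀ c ∈ p.2, (∀ q ∈ (PySem.Dict.ofList join_cond).items, c ∈ q.2 → q.1 ∈ sub_plan_query) →
      2 ≤ ((PySem.Str.split? c "=").getD []).length
instance (sub_plan_query : List String) (join_cond : List (String × List String)) : Decidable (Pre_get_sub_plan_join_key sub_plan_query join_cond) := by unfold Pre_get_sub_plan_join_key; infer_instance

def pvWitness_get_sub_plan_join_key : List String × (List (String × List String)) :=
  (["a", "b"], [("a", ["a.x = b.y", "a.z=c.w"]), ("b", ["a.x = b.y"]), ("c", ["c.u=b.v"])])

def Spec_get_sub_plan_join_key (sub_plan_query : List String) (join_cond : List (String × List String)) (out : List (String × List String)) : Prop := out = get_sub_plan_join_key_alt sub_plan_query join_cond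
instance (sub_plan_query : List String) (join_cond : List (String × List String)) (out : List (String × List String)) : Decidable (Spec_get_sub_plan_join_key sub_plan_query join_cond out) := by unfold Spec_get_sub_plan_join_key; infer_instance

-- ===== CLAIM (what is proved, stated in full; the proofs are below) =====
def Claim_equal_get_sub_plan_join_key : Prop := ∀ (sub_plan_query : List String) (join_cond : List (String × List String)), Dom_get_sub_plan_join_key sub_plan_query join_cond → Pre_get_sub_plan_join_key sub_plan_query join_cond → Spec_get_sub_plan_join_key sub_plan_query join_cond (get_sub_plan_join_key sub_plan_query join_cond)

-- ===== LEMMAS AND PROOFS =====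

-- membership in A's untouched accumulator
lemma pv_memU (spq : List String) (c : String) :
    ∀ (es : List (String × List String)) (u : PySem.Set String),
      c ∈ es.foldl (fun u p => if spq.contains p.1 then u else PySem.Set.union u p.2) u ↔
        c ∈ u ∨ ∃ p ∈ es, spq.contains p.1 = false ∧ c ∈ p.2 := by
  intro es
  induction es with
  | nil => simp
  | cons p es ih =>
    intro u
    by_cases h : spq.contains p.1
    · rw [List.foldl_cons, if_pos h, ih]
      simp only [List.mem_cons]
      constructor
      · rintro (hu | ⟨q, hq, hf, hc⟩)
        · exact Or.inl hu
        · exact Or.inr ⟨q, Or.inr hq, hf, hc⟩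
      · rintro (hu | ⟨q, (rfl | hq), hf, hc⟩)
        · exact Or.inl hu
        · rw [h] at hf; cases hf
        · exact Or.inr ⟨q, hq, hf, hc⟩
    · rw [List.foldl_cons, if_neg h, ih]
      rw [show PySem.Set.union u p.2 = PySem.Set.update u p.2 from rfl, PySem.Set.mem_update]
      simp only [Bool.not_eq_true] at h
      simp only [List.mem_cons]
      constructor
      · rintro ((hu | hp) | ⟨q, hq, hf, hc⟩)
        · exact Or.inl hu
        · exact Or.inr ⟨p, Or.inl rfl, h, hp⟩
        · exact Or.inr ⟨q, Or.inr hq, hf, hc⟩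
      · rintro (hu | ⟨q, (rfl | hq), hf, hc⟩)
        · exact Or.inl (Or.inl hu)
        · exact Or.inl (Or.inr hc)
        · exact Or.inr ⟨q, hq, hf, hc⟩

-- the keys of B's inverted index
lemma pv_keysIdx :
    ∀ (es : List (String × List String)) (d : PySem.Dict String (PySem.Set String)),
      (es.foldl (fun d p => p.2.foldl (fun d cond => d.modify cond PySem.Set.empty (fun s => PySem.Set.add s p.1)) d) d).keys
        = es.foldl (fun k p => PySem.Set.update k p.2) d.keys := by
  intro es
  induction es with
  | nil => simp
  | cons p es ih =>
    intro d
    rw [List.foldl_cons, List.foldl_cons, ih,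
      PySem.Dict.keys_foldl_modify p.2 PySem.Set.empty (fun _ _ => fun s => PySem.Set.add s p.1)]

-- collapsing the accumulator fold into one Set.update
lemma pv_updFlat :
    ∀ (es : List (String × List String)) (k : PySem.Set String),
      es.foldl (fun k p => PySem.Set.update k p.2) k = PySem.Set.update k (es.flatMap (·.2)) := by
  intro es
  induction es with
  | nil => intro k; simp [PySem.Set.update]
  | cons p es ih =>
    intro k
    rw [List.foldl_cons, ih, List.flatMap_cons, PySem.Set.update_append]

-- membership in one value of B's inverted index (inner loop)
lemma pv_memIdxVal_inner (tab : String) (t c : String) :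
    ∀ (cs : List String) (d : PySem.Dict String (PySem.Set String)),
      t ∈ (cs.foldl (fun d c' => d.modify c' PySem.Set.empty (fun s => PySem.Set.add s tab)) d).getD c PySem.Set.empty ↔
        t ∈ d.getD c PySem.Set.empty ∨ (t = tab ∧ c ∈ cs) := by
  intro cs
  induction cs with
  | nil => simp
  | cons c' cs ih =>
    intro d
    rw [List.foldl_cons, ih, PySem.Dict.getD_modify]
    by_cases h : c = c'
    · subst h
      simp [PySem.Set.mem_add]
      tauto
    · simp [h]

-- membership in one value of B's inverted index
lemma pv_memIdxVal (t c : String) :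
    ∀ (es : List (String × List String)) (d : PySem.Dict String (PySem.Set String)),
      t ∈ (es.foldl (fun d p => p.2.foldl (fun d cond => d.modify cond PySem.Set.empty (fun s => PySem.Set.add s p.1)) d) d).getD c PySem.Set.empty ↔
        t ∈ d.getD c PySem.Set.empty ∨ ∃ p ∈ es, p.1 = t ∧ c ∈ p.2 := by
  intro es
  induction es with
  | nil => simp
  | cons p es ih =>
    intro d
    rw [List.foldl_cons, ih, pv_memIdxVal_inner]
    simp only [List.mem_cons]
    constructor
    · rintro ((h | ⟨rfl, hc⟩) | ⟨q, hq, rfl, hc⟩)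
      · exact Or.inl h
      · exact Or.inr ⟨p, Or.inl rfl, rfl, hc⟩
      · exact Or.inr ⟨q, Or.inr hq, rfl, hc⟩
    · rintro (h | ⟨q, (rfl | hq), rfl, hc⟩)
      · exact Or.inl (Or.inl h)
      · exact Or.inl (Or.inr ⟨rfl, hc⟩)
      · exact Or.inr ⟨q, hq, rfl, hc⟩

-- a dict with distinct keys is its key list paired with its lookups
lemma pv_items_eq_keys_map (d : PySem.Dict String (PySem.Set String)) (h : d.keys.Nodup) :
    d.items = d.keys.map (fun k => (k, d.getD k PySem.Set.empty)) := by
  obtain ⟨l⟩ := d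
  induction l with
  | nil => rfl
  | cons p rest ih =>
    obtain ⟨k, v⟩ := p
    simp only [PySem.Dict.keys] at h ih ⊢
    simp only [List.map_cons, List.nodup_cons, List.mem_map] at h ⊢
    obtain ⟨hk, hrest⟩ := h
    congr 1
    · simp [PySem.Dict.getD_eq_get?_getD, PySem.Dict.get?_mk_cons]
    · have h2 : List.map (fun k' => (k', (PySem.Dict.mk ((k, v) :: rest)).getD k' PySem.Set.empty)) (rest.map (·.1))
             = List.map (fun k' => (k', (PySem.Dict.mk rest).getD k' PySem.Set.empty)) (rest.map (·.1)) := by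
        apply List.map_congr_left
        intro k' hk'
        have hne : (k == k') = false := by
          simp only [beq_eq_false_iff_ne]
          rintro rfl
          simp only [List.mem_map] at hk'
          obtain ⟨a, ha, ha2⟩ := hk'
          exact hk ⟨a, ha, ha2⟩
        simp [PySem.Dict.getD_eq_get?_getD, PySem.Dict.get?_mk_cons, hne]
      rw [h2]
      exact ih hrest

-- adding an element that fails the filter predicate
lemma pv_add_filter_false (P : String → Bool) (k : PySem.Set String) (c : String) (hc : P c = false) :
    (PySem.Set.add k c).filter P = k.filter P := by
  rw [PySem.Set.add_eq_ite]
  split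
  · rfl
  · simp [List.filter_append, hc]

-- update with elements that all fail P
lemma pv_updP (P E : String → Bool) :
    ∀ (cs : List String) (k : PySem.Set String), (∀ c ∈ cs, P c = false) →
      (PySem.Set.update k cs).filter (fun c => E c && P c) = k.filter (fun c => E c && P c) := by
  intro cs
  induction cs with
  | nil => intro k _; rfl
  | cons c cs ih =>
    intro k hcs
    rw [PySem.Set.update_cons, ih _ (fun c' hc' => hcs c' (List.mem_cons_of_mem _ hc')),
      pv_add_filter_false _ _ _ (by simp [hcs c (List.mem_cons_self)])]

-- parallel update of both accumulators
lemma pv_upd (P E : String → Bool) :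
    ∀ (cs : List String) (k t : PySem.Set String),
      (∀ c, P c = true → (c ∈ k ↔ c ∈ t)) →
      k.filter (fun c => E c && P c) = t.filter P →
      (∀ c ∈ cs, E c = true) →
      (PySem.Set.update k cs).filter (fun c => E c && P c) = (PySem.Set.update t cs).filter P := by
  intro cs
  induction cs with
  | nil => intro k t _ hfil _; exact hfil
  | cons c cs ih =>
    intro k t hmem hfil hEs
    rw [PySem.Set.update_cons, PySem.Set.update_cons]
    apply ih
    · intro c' hc'
      rw [PySem.Set.mem_add, PySem.Set.mem_add, hmem c' hc']
    · by_cases hp : P c = true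
      · have hE : E c = true := hEs c List.mem_cons_self
        by_cases hm : c ∈ k
        · rw [PySem.Set.add_of_mem hm, PySem.Set.add_of_mem ((hmem c hp).mp hm), hfil]
        · rw [PySem.Set.add_of_not_mem hm,
            PySem.Set.add_of_not_mem (fun h => hm ((hmem c hp).mpr h))]
          simp [List.filter_append, hp, hE, hfil]
      · have hp' : P c = false := by simpa using hp
        rw [pv_add_filter_false _ _ _ hp',
          pv_add_filter_false (fun c => E c && P c) _ _ (by simp [hp']), hfil]
    · intro c' hc'
      exact hEs c' (List.mem_cons_of_mem _ hc')

-- CORE: B's filtered key list equals A's touched-minus-untouched list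
lemma pv_core (spq : List String) (P E : String → Bool) :
    ∀ (es : List (String × List String)) (k t : PySem.Set String),
      (∀ p ∈ es, spq.contains p.1 = false → ∀ c ∈ p.2, P c = false) →
      (∀ p ∈ es, spq.contains p.1 = true → ∀ c ∈ p.2, E c = true) →
      (∀ c, P c = true → (c ∈ k ↔ c ∈ t)) →
      k.filter (fun c => E c && P c) = t.filter P →
      (es.foldl (fun k p => PySem.Set.update k p.2) k).filter (fun c => E c && P c)
        = (es.foldl (fun t p => if spq.contains p.1 then PySem.Set.union t p.2 else t) t).filter P := by
  intro es
  induction es with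
  | nil => intro k t _ _ hmem hfil; exact hfil
  | cons p es ih =>
    intro k t h1 h2 hmem hfil
    rw [List.foldl_cons, List.foldl_cons]
    by_cases h : spq.contains p.1
    · rw [if_pos h]
      apply ih _ _ (fun q hq => h1 q (List.mem_cons_of_mem _ hq)) (fun q hq => h2 q (List.mem_cons_of_mem _ hq))
      · intro c' hc'
        rw [PySem.Set.mem_update,
          show PySem.Set.union t p.2 = PySem.Set.update t p.2 from rfl, PySem.Set.mem_update, hmem c' hc']
      · exact pv_upd P E p.2 k t hmem hfil (h2 p List.mem_cons_self h)
    · rw [if_neg h]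
      have hfalse : ∀ c ∈ p.2, P c = false :=
        h1 p List.mem_cons_self (by simpa using h)
      apply ih _ _ (fun q hq => h1 q (List.mem_cons_of_mem _ hq)) (fun q hq => h2 q (List.mem_cons_of_mem _ hq))
      · intro c' hc'
        rw [PySem.Set.mem_update, hmem c' hc']
        constructor
        · rintro (hk | hp)
          · exact hk
          · rw [hfalse c' hp] at hc'; cases hc'
        · exact Or.inl
      · rw [pv_updP P E p.2 k hfalse, hfil]

-- A's two-branch dict step is B's modify step
lemma pv_step_eq (d : PySem.Dict String (PySem.Set String)) (tb ky : String) :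
    (if d.contains tb = false then d.insert tb (PySem.Set.ofList [ky])
     else d.modify tb PySem.Set.empty (fun s => PySem.Set.add s ky))
      = d.modify tb PySem.Set.empty (fun s => PySem.Set.add s ky) := by
  by_cases h : d.contains tb
  · simp [h]
  · have h' : d.contains tb = false := by simpa using h
    rw [if_pos h']
    show _ = d.insert tb (PySem.Set.add (d.getD tb PySem.Set.empty) ky)
    rw [PySem.Dict.getD_of_not_contains d PySem.Set.empty h']
    rfl

-- proof-only abbreviations
def pvF (spq : List String) (t : PySem.Set String) (p : String × List String) : PySem.Set String :=
  if spq.contains p.1 then PySem.Set.union t p.2 else t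
def pvU (spq : List String) (u : PySem.Set String) (p : String × List String) : PySem.Set String :=
  if spq.contains p.1 then u else PySem.Set.union u p.2
def pvP (spq : List String) (es : List (String × List String)) (c : String) : Bool :=
  decide (∀ q ∈ es, c ∈ q.2 → spq.contains q.1 = true)
def pvE (spq : List String) (es : List (String × List String)) (c : String) : Bool :=
  decide (∃ q ∈ es, spq.contains q.1 = true ∧ c ∈ q.2)
def pvTab (key : String) : String :=
  PySem.Str.strip (PySem.List.pyGetD ((PySem.Str.split? key ".").getD []) 0 "")
def pvGStep (d : PySem.Dict String (PySem.Set String)) (key : String) : PySem.Dict String (PySem.Set String) :=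
  d.modify (pvTab key) PySem.Set.empty (fun s => PySem.Set.add s key)
def pvG (d : PySem.Dict String (PySem.Set String)) (cond : String) : PySem.Dict String (PySem.Set String) :=
  [PySem.Str.strip (PySem.List.pyGetD ((PySem.Str.split? cond "=").getD []) 0 ""),
   PySem.Str.strip (PySem.List.pyGetD ((PySem.Str.split? cond "=").getD []) 1 "")].foldl pvGStep d
def pvIdx (es : List (String × List String)) : PySem.Dict String (PySem.Set String) :=
  es.foldl
    (fun (d : PySem.Dict String (PySem.Set String)) p =>
      p.2.foldl (fun d cond => d.modify cond PySem.Set.empty (fun s => PySem.Set.add s p.1)) d)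
    PySem.Dict.empty
def pvK (es : List (String × List String)) : PySem.Set String :=
  PySem.Set.ofList (es.flatMap (·.2))

lemma pv_hkeys (es : List (String × List String)) : (pvIdx es).keys = pvK es := by
  unfold pvIdx pvK
  rw [pv_keysIdx, PySem.Dict.keys_empty, pv_updFlat, PySem.Set.update_nil_left]

lemma pv_hpred (spq : List String) (es : List (String × List String)) (c : String) :
    (((pvIdx es).getD c PySem.Set.empty).any (fun t => spq.contains t)
      && ((pvIdx es).getD c PySem.Set.empty).all (fun t => spq.contains t))
    = (pvE spq es c && pvP spq es c) := by
  have hmem : ∀ t, t ∈ (pvIdx es).getD c PySem.Set.empty ↔ ∃ p ∈ es, p.1 = t ∧ c ∈ p.2 := by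
    intro t
    unfold pvIdx
    rw [pv_memIdxVal, PySem.Dict.getD_empty]
    simp [PySem.Set.empty]
  have hany : (((pvIdx es).getD c PySem.Set.empty).any (fun t => spq.contains t)) = pvE spq es c := by
    rw [Bool.eq_iff_iff, List.any_eq_true]
    unfold pvE
    rw [decide_eq_true_iff]
    constructor
    · rintro ⟨t, ht, hc⟩
      obtain ⟨p, hp, rfl, hcp⟩ := (hmem t).mp ht
      exact ⟨p, hp, hc, hcp⟩
    · rintro ⟨q, hq, hc, hcq⟩
      exact ⟨q.1, (hmem q.1).mpr ⟨q, hq, rfl, hcq⟩, hc⟩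
  have hall : (((pvIdx es).getD c PySem.Set.empty).all (fun t => spq.contains t)) = pvP spq es c := by
    rw [Bool.eq_iff_iff, List.all_eq_true]
    unfold pvP
    rw [decide_eq_true_iff]
    constructor
    · intro h q hq hcq
      exact h q.1 ((hmem q.1).mpr ⟨q, hq, rfl, hcq⟩)
    · intro h t ht
      obtain ⟨p, hp, rfl, hcp⟩ := (hmem t).mp ht
      exact h p hp hcp
  rw [hany, hall]

lemma pv_hker (spq : List String) (es : List (String × List String)) :
    (pvK es).filter (fun c => pvE spq es c && pvP spq es c)
      = (es.foldl (pvF spq) PySem.Set.empty).filter (pvP spq es) := by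
  have h1 : ∀ p ∈ es, spq.contains p.1 = false → ∀ c ∈ p.2, pvP spq es c = false := by
    intro p hp hf c hc
    unfold pvP
    rw [decide_eq_false_iff_not]
    intro hall
    rw [hall p hp hc] at hf
    cases hf
  have h2 : ∀ p ∈ es, spq.contains p.1 = true → ∀ c ∈ p.2, pvE spq es c = true := by
    intro p hp ht c hc
    unfold pvE
    rw [decide_eq_true_iff]
    exact ⟨p, hp, ht, hc⟩
  have h := pv_core spq (pvP spq es) (pvE spq es) es ([] : PySem.Set String) ([] : PySem.Set String)
    h1 h2 (fun _ _ => Iff.rfl) rfl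
  rw [pv_updFlat, PySem.Set.update_nil_left] at h
  exact h

lemma pv_hdiff (spq : List String) (es : List (String × List String)) :
    PySem.Set.diff (es.foldl (pvF spq) PySem.Set.empty) (es.foldl (pvU spq) PySem.Set.empty)
      = (es.foldl (pvF spq) PySem.Set.empty).filter (pvP spq es) := by
  show List.filter _ _ = _
  apply List.filter_congr
  intro c _
  have hU := pv_memU spq c es PySem.Set.empty
  cases hd : pvP spq es c with
  | false =>
    unfold pvP at hd
    rw [decide_eq_false_iff_not] at hd
    simp only [not_forall] at hd
    obtain ⟨q, hq, hcq, hne⟩ := hd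
    have hcU : c ∈ es.foldl (pvU spq) PySem.Set.empty :=
      hU.mpr (Or.inr ⟨q, hq, by simpa using hne, hcq⟩)
    have hcU' : c ∈ List.foldl (pvU spq) ([] : PySem.Set String) es := hcU
    simp [hcU']
  | true =>
    unfold pvP at hd
    rw [decide_eq_true_iff] at hd
    have hcU : c ∉ es.foldl (pvU spq) PySem.Set.empty := by
      intro hm
      rcases hU.mp hm with h0 | ⟨q, hq, hf, hcq⟩
      · exact (List.not_mem_nil) h0
      · rw [hd q hq hcq] at hf
        cases hf
    have hcU' : c ∉ List.foldl (pvU spq) ([] : PySem.Set String) es := hcU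
    simp [hcU']

lemma pv_main (spq : List String) (es : List (String × List String)) :
    (let tu := es.foldl
        (fun (tu : PySem.Set String × PySem.Set String) p =>
          if spq.contains p.1 then (PySem.Set.union tu.1 p.2, tu.2)
          else (tu.1, PySem.Set.union tu.2 p.2))
        (PySem.Set.empty, PySem.Set.empty)
     ((PySem.Set.diff tu.1 tu.2).foldl
        (fun (d : PySem.Dict String (PySem.Set String)) cond =>
          let key1 := PySem.Str.strip (PySem.List.pyGetD ((PySem.Str.split? cond "=").getD []) 0 "")
          let table1 := PySem.Str.strip (PySem.List.pyGetD ((PySem.Str.split? key1 ".").getD []) 0 "")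
          let d1 := if d.contains table1 = false then d.insert table1 (PySem.Set.ofList [key1])
                    else d.modify table1 PySem.Set.empty (fun s => PySem.Set.add s key1)
          let key2 := PySem.Str.strip (PySem.List.pyGetD ((PySem.Str.split? cond "=").getD []) 1 "")
          let table2 := PySem.Str.strip (PySem.List.pyGetD ((PySem.Str.split? key2 ".").getD []) 0 "")
          if d1.contains table2 = false then d1.insert table2 (PySem.Set.ofList [key2])
          else d1.modify table2 PySem.Set.empty (fun s => PySem.Set.add s key2))
        PySem.Dict.empty).items)
    = (let idx := es.foldl
        (fun (d : PySem.Dict String (PySem.Set String)) p =>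
          p.2.foldl (fun d cond => d.modify cond PySem.Set.empty (fun s => PySem.Set.add s p.1)) d)
        PySem.Dict.empty
       (idx.items.foldl
        (fun (d : PySem.Dict String (PySem.Set String)) q =>
          if q.2.any (fun t => spq.contains t) && q.2.all (fun t => spq.contains t) then
            [PySem.Str.strip (PySem.List.pyGetD ((PySem.Str.split? q.1 "=").getD []) 0 ""),
             PySem.Str.strip (PySem.List.pyGetD ((PySem.Str.split? q.1 "=").getD []) 1 "")].foldl
              (fun d key =>
                d.modify (PySem.Str.strip (PySem.List.pyGetD ((PySem.Str.split? key ".").getD []) 0 ""))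
                  PySem.Set.empty (fun s => PySem.Set.add s key)) d
          else d)
        PySem.Dict.empty).items) := by
  dsimp only
  rw [show (fun (tu : PySem.Set String × PySem.Set String) (p : String × List String) =>
        if spq.contains p.1 then (PySem.Set.union tu.1 p.2, tu.2)
        else (tu.1, PySem.Set.union tu.2 p.2))
      = (fun (tu : PySem.Set String × PySem.Set String) (p : String × List String) =>
          (pvF spq tu.1 p, pvU spq tu.2 p)) from
      funext fun tu => funext fun p => by
        unfold pvF pvU
        cases spq.contains p.1 <;> simp]
  rw [PySem.List.foldl_prod_mk (pvF spq) (pvU spq) es PySem.Set.empty PySem.Set.empty]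
  dsimp only
  rw [pv_hdiff]
  apply congrArg PySem.Dict.items
  refine Eq.trans (PySem.List.foldl_congr_mem' _ _ pvG _ ?hbody) ?rest
  case hbody =>
    intro cond _ d
    dsimp only
    rw [pv_step_eq, pv_step_eq]
    rfl
  case rest =>
    have hnodup : (pvIdx es).keys.Nodup := by
      rw [pv_hkeys]; exact PySem.Set.nodup_ofList _
    have hb : (pvIdx es).items.foldl
        (fun (d : PySem.Dict String (PySem.Set String)) q =>
          if q.2.any (fun t => spq.contains t) && q.2.all (fun t => spq.contains t) then
            [PySem.Str.strip (PySem.List.pyGetD ((PySem.Str.split? q.1 "=").getD []) 0 ""),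
             PySem.Str.strip (PySem.List.pyGetD ((PySem.Str.split? q.1 "=").getD []) 1 "")].foldl
              (fun d key =>
                d.modify (PySem.Str.strip (PySem.List.pyGetD ((PySem.Str.split? key ".").getD []) 0 ""))
                  PySem.Set.empty (fun s => PySem.Set.add s key)) d
          else d)
        PySem.Dict.empty
      = ((pvK es).filter (fun c => pvE spq es c && pvP spq es c)).foldl pvG PySem.Dict.empty := by
      rw [PySem.List.foldl_if_eq_foldl_filter]
      conv_lhs => rw [pv_items_eq_keys_map _ hnodup, pv_hkeys]
      rw [List.filter_map, List.foldl_map]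
      rw [show ((fun (q : String × PySem.Set String) =>
            q.2.any (fun t => spq.contains t) && q.2.all (fun t => spq.contains t))
          ∘ (fun k => (k, (pvIdx es).getD k PySem.Set.empty))) = (fun c => pvE spq es c && pvP spq es c)
        from funext fun c => pv_hpred spq es c]
      rfl
    refine Eq.trans ?e1 hb.symm
    rw [← pv_hker spq es]

-- ===== VERDICT (by name: the statement is the Claim_ definition above) =====
theorem get_sub_plan_join_key_spec : Claim_equal_get_sub_plan_join_key := by
  intro spq jc _ _
  unfold Spec_get_sub_plan_join_key get_sub_plan_join_key get_sub_plan_join_key_alt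
  exact pv_main spq (PySem.Dict.ofList jc).items
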